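-- pv_equiv track=rewrite | github.com/shalgrim/advent-of-code | python/y2023/day03_2.py | get_adjacent_numbers
-- ===== SOURCE A (Python) =====
-- def get_adjacent_numbers(location, number_locations):
--     answer = []
--     for number_loc, value in number_locations.items():
--         found = False
--         my_locs = [number_loc]
--         my_val = value // 10
--
--         while my_val:
--             my_locs.append((my_locs[-1][0] + 1, my_locs[-1][1]))
--             my_val = my_val // 10
--         leftest = max(0, my_locs[0][0] - 1)
--         rightest = my_locs[-1][0] + 1
--         uppest = max(0, number_loc[1] - 1)
--         downest = number_loc[1] + 1
--         for y in range(uppest, downest + 1):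
--             if found:
--                 break
--             for x in range(leftest, rightest + 1):
--                 if found:
--                     break
--                 if (x, y) == location:
--                     answer.append(value)
--                     found = True
--     return answer
-- ===== SOURCE B (Python) =====
-- def get_adjacent_numbers(location, number_locations):
--     x, y = location
--     answer = []
--     for (nx, ny), value in number_locations.items():
--         nd = 1
--         v = value // 10
--         while v:
--             nd += 1
--             v //= 10
--         if max(0, nx - 1) <= x <= nx + nd and max(0, ny - 1) <= y <= ny + 1:
--             answer.append(value)
--     return answer
-- ===== Notes on version B (the rewrite author's own statement) =====
-- stated objective: simpler
-- what changed: B computes each number's bounding box arithmetically (clamped left/top edges, right edge from the digit count) and tests the location with a single comparison, instead of materialising the list of digit cells and scanning every cell of the box against the location with found/break flags.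
import Mathlib
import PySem

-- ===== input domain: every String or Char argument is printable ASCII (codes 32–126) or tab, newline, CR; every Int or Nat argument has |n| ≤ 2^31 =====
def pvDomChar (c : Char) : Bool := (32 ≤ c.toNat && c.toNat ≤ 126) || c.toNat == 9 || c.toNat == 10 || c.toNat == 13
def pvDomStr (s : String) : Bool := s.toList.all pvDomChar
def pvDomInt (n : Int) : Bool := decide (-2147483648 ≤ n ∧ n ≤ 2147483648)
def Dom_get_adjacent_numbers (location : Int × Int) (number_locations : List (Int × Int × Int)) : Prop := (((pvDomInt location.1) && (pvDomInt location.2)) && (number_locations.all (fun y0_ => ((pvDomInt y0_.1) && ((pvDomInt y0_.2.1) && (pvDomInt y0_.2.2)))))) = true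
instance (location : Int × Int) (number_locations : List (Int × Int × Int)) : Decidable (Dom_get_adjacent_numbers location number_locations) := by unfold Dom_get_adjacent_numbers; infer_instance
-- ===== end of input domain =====

-- B replaces A's per-number digit-cell list and nested cell-by-cell scan of the bounding box
-- with the arithmetic bounds of the box and a single comparison (objective: simpler).

-- ===== PORT A =====
-- the dict[(int,int), int] argument, decoded with Python dict semantics (duplicate keys
-- collapse: first position, last value); shared input decoding for both ports
def pvDictOf (number_locations : List (Int × Int × Int)) : PySem.Dict (Int × Int) Int :=
  PySem.Dict.ofList (number_locations.map (fun t => ((t.1, t.2.1), t.2.2)))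

-- Python: 'while my_val: my_locs.append((my_locs[-1][0] + 1, my_locs[-1][1])); my_val = my_val // 10'.
-- The guard is '0 < my_val' instead of 'my_val ≠ 0' only to make the port total: for negative
-- my_val Python's loop never terminates (my_val // 10 stabilises at -1), so no input both
-- programs return on is affected.  my_locs is nonempty
-- throughout, so my_locs[-1] is written getLastD.
def pvLocsLoop (my_locs : List (Int × Int)) (my_val : Int) : List (Int × Int) :=
  if 0 < my_val then
    pvLocsLoop (my_locs ++ [((my_locs.getLastD (0, 0)).1 + 1, (my_locs.getLastD (0, 0)).2)])
      (PySem.Int.floordiv my_val 10)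
  else my_locs
termination_by my_val.toNat
decreasing_by
  rw [PySem.Int.floordiv_eq_ediv_of_pos (by norm_num)]
  omega

-- inner 'for x in range(leftest, rightest + 1)' with the found/break logic; state = (answer, found)
def pvScanX (location : Int × Int) (value y : Int) : List Int → List Int × Bool → List Int × Bool
  | [], st => st
  | x :: xs, (answer, found) =>
    if found then (answer, found)
    else if (x, y) = location then pvScanX location value y xs (answer ++ [value], true)
    else pvScanX location value y xs (answer, found)

-- outer 'for y in range(uppest, downest + 1)' with its found/break check
def pvScanY (location : Int × Int) (value : Int) (xs : List Int) :
    List Int → List Int × Bool → List Int × Bool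
  | [], st => st
  | y :: ys, (answer, found) =>
    if found then (answer, found)
    else pvScanY location value xs ys (pvScanX location value y xs (answer, found))

def get_adjacent_numbers (location : Int × Int) (number_locations : List (Int × Int × Int)) : List Int :=
  (pvDictOf number_locations).items.foldl
    (fun answer p =>
      let number_loc := p.1
      let value := p.2
      let my_locs := pvLocsLoop [number_loc] (PySem.Int.floordiv value 10)
      let leftest := max 0 ((my_locs.headD (0, 0)).1 - 1)
      let rightest := (my_locs.getLastD (0, 0)).1 + 1
      let uppest := max 0 (number_loc.2 - 1)
      let downest := number_loc.2 + 1
      (pvScanY location value (PySem.List.pyRange leftest (rightest + 1) 1)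
        (PySem.List.pyRange uppest (downest + 1) 1) (answer, false)).1)
    []

-- ===== PORT B =====
-- 'nd = 1; v = value // 10; while v: nd += 1; v //= 10' — digit count; guard '0 < v'
-- totalizes exactly as in pvLocsLoop (Python diverges for negative values)
def pvNumDigits (nd v : Int) : Int :=
  if 0 < v then pvNumDigits (nd + 1) (PySem.Int.floordiv v 10) else nd
termination_by v.toNat
decreasing_by
  rw [PySem.Int.floordiv_eq_ediv_of_pos (by norm_num)]
  omega

def get_adjacent_numbers_alt (location : Int × Int) (number_locations : List (Int × Int × Int)) : List Int :=
  (pvDictOf number_locations).items.foldl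
    (fun answer p =>
      let nd := pvNumDigits 1 (PySem.Int.floordiv p.2 10)
      if max 0 (p.1.1 - 1) ≤ location.1 ∧ location.1 ≤ p.1.1 + nd ∧
          max 0 (p.1.2 - 1) ≤ location.2 ∧ location.2 ≤ p.1.2 + 1
      then answer ++ [p.2] else answer)
    []

-- ===== PRECONDITION & SPEC =====
def Spec_get_adjacent_numbers (location : Int × Int) (number_locations : List (Int × Int × Int)) (out : List Int) : Prop := out = get_adjacent_numbers_alt location number_locations
instance (location : Int × Int) (number_locations : List (Int × Int × Int)) (out : List Int) : Decidable (Spec_get_adjacent_numbers location number_locations out) := by unfold Spec_get_adjacent_numbers; infer_instance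

-- ===== CLAIM (what is proved, stated in full; the proofs are below) =====
def Claim_equal_get_adjacent_numbers : Prop := ∀ (location : Int × Int) (number_locations : List (Int × Int × Int)), Dom_get_adjacent_numbers location number_locations → Spec_get_adjacent_numbers location number_locations (get_adjacent_numbers location number_locations)

-- ===== LEMMAS AND PROOFS =====

theorem pvNumDigits_shift_aux : ∀ (n : Nat) (v : Int), v.toNat ≤ n → ∀ nd : Int,
    pvNumDigits nd v = nd + pvNumDigits 0 v := by
  intro n
  induction n with
  | zero =>
    intro v hv nd
    have h : ¬ 0 < v := by omega
    rw [pvNumDigits]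
    simp only [h, if_false]
    rw [pvNumDigits]
    simp [h]
  | succ n ih =>
    intro v hv nd
    by_cases h : 0 < v
    · have hd : PySem.Int.floordiv v 10 = v / 10 := PySem.Int.floordiv_eq_ediv_of_pos (by norm_num)
      have hle : (PySem.Int.floordiv v 10).toNat ≤ n := by rw [hd]; omega
      have e1 : pvNumDigits nd v = pvNumDigits (nd + 1) (PySem.Int.floordiv v 10) := by
        rw [pvNumDigits]; simp [h]
      have e2 : pvNumDigits 0 v = pvNumDigits 1 (PySem.Int.floordiv v 10) := by
        rw [pvNumDigits]; simp [h]
      rw [e1, e2, ih _ hle (nd + 1), ih _ hle 1]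
      ring
    · rw [pvNumDigits]
      simp only [h, if_false]
      rw [pvNumDigits]
      simp [h]

theorem pvNumDigits_shift (nd v : Int) : pvNumDigits nd v = nd + pvNumDigits 0 v :=
  pvNumDigits_shift_aux v.toNat v le_rfl nd

theorem pvLocsLoop_aux : ∀ (n : Nat) (v : Int), v.toNat ≤ n → ∀ locs : List (Int × Int), locs ≠ [] →
    (pvLocsLoop locs v).headD (0, 0) = locs.headD (0, 0) ∧
    (pvLocsLoop locs v).getLastD (0, 0) =
      ((locs.getLastD (0, 0)).1 + pvNumDigits 0 v, (locs.getLastD (0, 0)).2) := by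
  intro n
  induction n with
  | zero =>
    intro v hv locs hne
    have h : ¬ 0 < v := by omega
    have hz : pvNumDigits 0 v = 0 := by rw [pvNumDigits]; simp [h]
    rw [pvLocsLoop]
    simp [h, hz]
  | succ n ih =>
    intro v hv locs hne
    by_cases h : 0 < v
    · have hd : PySem.Int.floordiv v 10 = v / 10 := PySem.Int.floordiv_eq_ediv_of_pos (by norm_num)
      have hle : (PySem.Int.floordiv v 10).toNat ≤ n := by rw [hd]; omega
      have e : pvLocsLoop locs v =
          pvLocsLoop (locs ++ [((locs.getLastD (0, 0)).1 + 1, (locs.getLastD (0, 0)).2)])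
            (PySem.Int.floordiv v 10) := by
        rw [pvLocsLoop]; simp [h]
      have hD : pvNumDigits 0 v = 1 + pvNumDigits 0 (PySem.Int.floordiv v 10) := by
        have e2 : pvNumDigits 0 v = pvNumDigits 1 (PySem.Int.floordiv v 10) := by
          rw [pvNumDigits]; simp [h]
        rw [e2, pvNumDigits_shift 1 _]
      obtain ⟨ih1, ih2⟩ := ih (PySem.Int.floordiv v 10) hle
        (locs ++ [((locs.getLastD (0, 0)).1 + 1, (locs.getLastD (0, 0)).2)]) (by simp)
      constructor
      · rw [e, ih1]
        cases locs with
        | nil => exact absurd rfl hne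
        | cons a t => simp
      · rw [e, ih2, List.getLastD_concat, hD]
        simp only [Prod.mk.injEq]
        constructor
        · ring
        · trivial
    · have hz : pvNumDigits 0 v = 0 := by rw [pvNumDigits]; simp [h]
      rw [pvLocsLoop]
      simp [h, hz]

theorem pvLocsLoop_spec (v : Int) (locs : List (Int × Int)) (hne : locs ≠ []) :
    (pvLocsLoop locs v).headD (0, 0) = locs.headD (0, 0) ∧
    (pvLocsLoop locs v).getLastD (0, 0) =
      ((locs.getLastD (0, 0)).1 + pvNumDigits 0 v, (locs.getLastD (0, 0)).2) :=
  pvLocsLoop_aux v.toNat v le_rfl locs hne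

theorem pvScanX_true (location : Int × Int) (value y : Int) (xs : List Int) (ans : List Int) :
    pvScanX location value y xs (ans, true) = (ans, true) := by
  cases xs <;> simp [pvScanX]

theorem pvScanX_false (location : Int × Int) (value y : Int) (xs : List Int) (ans : List Int) :
    pvScanX location value y xs (ans, false) =
      if location.2 = y ∧ location.1 ∈ xs then (ans ++ [value], true) else (ans, false) := by
  induction xs with
  | nil => simp [pvScanX]
  | cons x xs ih =>
    simp only [pvScanX, Bool.false_eq_true, if_false]
    by_cases h : (x, y) = location
    · rw [if_pos h, pvScanX_true]
      have hc : location.2 = y ∧ location.1 ∈ x :: xs := by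
        rw [← h]; simp
      rw [if_pos hc]
    · rw [if_neg h, ih]
      have hiff : (location.2 = y ∧ location.1 ∈ xs) ↔ (location.2 = y ∧ location.1 ∈ x :: xs) := by
        simp only [List.mem_cons]
        constructor
        · rintro ⟨h1, h2⟩; exact ⟨h1, Or.inr h2⟩
        · rintro ⟨h1, h2⟩
          refine ⟨h1, ?_⟩
          rcases h2 with h2 | h2
          · exfalso; apply h; rw [← h2, ← h1]
          · exact h2
      simp only [hiff]

theorem pvScanY_true (location : Int × Int) (value : Int) (xs ys : List Int) (ans : List Int) :
    pvScanY location value xs ys (ans, true) = (ans, true) := by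
  cases ys <;> simp [pvScanY]

theorem pvScanY_false (location : Int × Int) (value : Int) (xs ys : List Int) (ans : List Int) :
    pvScanY location value xs ys (ans, false) =
      if location.2 ∈ ys ∧ location.1 ∈ xs then (ans ++ [value], true) else (ans, false) := by
  induction ys with
  | nil => simp [pvScanY]
  | cons y ys ih =>
    simp only [pvScanY, Bool.false_eq_true, if_false]
    rw [pvScanX_false]
    by_cases hx : location.2 = y ∧ location.1 ∈ xs
    · rw [if_pos hx, pvScanY_true]
      have hc : location.2 ∈ y :: ys ∧ location.1 ∈ xs := ⟨by simp [hx.1], hx.2⟩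
      rw [if_pos hc]
    · rw [if_neg hx, ih]
      have hiff : (location.2 ∈ ys ∧ location.1 ∈ xs) ↔ (location.2 ∈ y :: ys ∧ location.1 ∈ xs) := by
        simp only [List.mem_cons]
        tauto
      simp only [hiff]

-- ===== VERDICT (by name: the statement is the Claim_ definition above) =====
theorem get_adjacent_numbers_spec : Claim_equal_get_adjacent_numbers := by
  intro location number_locations _
  unfold Spec_get_adjacent_numbers get_adjacent_numbers get_adjacent_numbers_alt
  apply PySem.List.foldl_congr_mem
  intro answer p _
  obtain ⟨⟨nx, ny⟩, v⟩ := p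
  dsimp only
  obtain ⟨hhead, hlast⟩ := pvLocsLoop_spec (PySem.Int.floordiv v 10) [(nx, ny)] (by simp)
  have hsing : ([((nx : Int), (ny : Int))].getLastD (0, 0)) = (nx, ny) := rfl
  rw [hsing] at hlast
  rw [List.headD_cons] at hhead
  rw [hhead, hlast, pvScanY_false, pvNumDigits_shift 1 _]
  simp only [PySem.List.mem_pyRange_one]
  split_ifs with h1 h2
  · rfl
  · exfalso; omega
  · exfalso; omega
  · rfl
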